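-- pv_equiv track=rewrite | github.com/kingpanther13/Hubitat-local-MCP-server | tests/sandbox_lint.py | _scrub_gstring_body
-- ===== SOURCE A (Python) =====
-- def _consume_gstring_interpolation(text: str, start: int) -> tuple[str, int]:
--     """Walk from `start` (index of `$` in `${`) to the matching `}`, returning
--     (preserved_text, index_past_close).
--
--     The body is preserved verbatim so downstream regex rules scan the Groovy
--     expression, except that nested string literals inside the body have their
--     contents blanked (so a `}` inside `"literal }"` doesn't close the
--     interpolation early, and a stray `getClass()` inside a nested literal
--     doesn't trigger a false positive).
--
--     Assumes `text[start] == '$'` and `text[start+1] == '{'`.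
--     """
--     out = ["  "]  # ${
--     depth = 1
--     k = start + 2
--     n = len(text)
--     while k < n and depth > 0:
--         ch = text[k]
--         if ch == "{":
--             depth += 1
--             out.append(ch)
--             k += 1
--         elif ch == "}":
--             depth -= 1
--             if depth == 0:
--                 out.append(" ")  # closing }
--                 k += 1
--                 break
--             out.append(ch)
--             k += 1
--         elif ch == '"' or ch == "'":
--             # Nested string literal inside the interpolation body. Skip past
--             # its contents (respecting escapes) so embedded `}` characters
--             # don't decrement our depth counter and stray sandbox-forbidden
--             # names inside literal text don't trigger false positives.
--             out.append(" ")
--             k += 1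
--             while k < n:
--                 if text[k] == "\\" and k + 1 < n:
--                     out.append("  ")
--                     k += 2
--                 elif text[k] == ch:
--                     out.append(" ")
--                     k += 1
--                     break
--                 else:
--                     out.append(" ")
--                     k += 1
--         elif ch == "\\" and k + 1 < n:
--             out.append(str(text[k]) + str(text[k + 1]))
--             k += 2
--         else:
--             out.append(ch)
--             k += 1
--     return "".join(out), k
--
-- def _scrub_gstring_body(body: str) -> str:
--     """Blank literal text in a triple-double-quoted GString body while
--     preserving ${...} interpolations verbatim. Shares nested-string-aware
--     brace handling with the single-line GString walker via
--     _consume_gstring_interpolation."""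
--     out = []
--     i = 0
--     n = len(body)
--     while i < n:
--         if body[i] == "\\" and i + 1 < n:
--             out.append("  ")
--             i += 2
--         elif body[i] == "$" and i + 1 < n and body[i + 1] == "{":
--             preserved, i = _consume_gstring_interpolation(body, i)
--             out.append(preserved)
--         else:
--             out.append(" ")
--             i += 1
--     return "".join(out)
-- ===== SOURCE B (Python) =====
-- def _scrub_gstring_body(body: str) -> str:
--     """Single flat state machine (no helper): blank literal text, keep ${...}
--     interpolation bodies verbatim, blanking nested string literals inside."""
--     out = []
--     st = 0          # 0 = literal text, 1 = inside ${...}, 2 = nested string inside ${...}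
--     depth = 0
--     quote = ""
--     i = 0
--     n = len(body)
--     while i < n:
--         ch = body[i]
--         if st == 0:
--             if ch == "\\" and i + 1 < n:
--                 out.append("  ")
--                 i += 2
--             elif ch == "$" and i + 1 < n and body[i + 1] == "{":
--                 out.append("  ")
--                 st = 1
--                 depth = 1
--                 i += 2
--             else:
--                 out.append(" ")
--                 i += 1
--         elif st == 1:
--             if ch == "{":
--                 out.append("{")
--                 depth += 1
--                 i += 1
--             elif ch == "}":
--                 depth -= 1
--                 out.append(" " if depth == 0 else "}")
--                 if depth == 0:
--                     st = 0
--                 i += 1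
--             elif ch == '"' or ch == "'":
--                 out.append(" ")
--                 quote = ch
--                 st = 2
--                 i += 1
--             elif ch == "\\" and i + 1 < n:
--                 out.append(body[i:i + 2])
--                 i += 2
--             else:
--                 out.append(ch)
--                 i += 1
--         else:
--             if ch == "\\" and i + 1 < n:
--                 out.append("  ")
--                 i += 2
--             else:
--                 out.append(" ")
--                 if ch == quote:
--                     st = 1
--                 i += 1
--     return "".join(out)
-- ===== Notes on version B (the rewrite author's own statement) =====
-- stated objective: simpler
-- what changed: Replaces the two-function design (outer loop plus a _consume_gstring_interpolation helper with its own nested while-loops) by one self-contained loop over the body driven by an explicit state variable (literal text / inside-interpolation with brace depth / nested string literal with its quote char).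
import Mathlib
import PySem

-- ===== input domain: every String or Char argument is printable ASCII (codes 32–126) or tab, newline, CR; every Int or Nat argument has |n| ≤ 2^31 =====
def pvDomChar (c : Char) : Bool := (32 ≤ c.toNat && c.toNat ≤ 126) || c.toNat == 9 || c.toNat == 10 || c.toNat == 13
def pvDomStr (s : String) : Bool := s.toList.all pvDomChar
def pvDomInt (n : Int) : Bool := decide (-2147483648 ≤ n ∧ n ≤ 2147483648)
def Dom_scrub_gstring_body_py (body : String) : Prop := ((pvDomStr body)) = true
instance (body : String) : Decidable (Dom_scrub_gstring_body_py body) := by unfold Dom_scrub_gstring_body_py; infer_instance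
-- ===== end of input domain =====

-- B flattens A's helper-based walker into a single state-machine loop (objective: simpler decomposition, same cost).
-- Loops are ported with a fuel parameter (fuel = number of characters left) purely as a totality device.

-- ===== PORT A =====
-- inner `while` of _consume_gstring_interpolation: skip a nested string literal, blanking it
def pvConsStr (q : Char) : Nat → List Char → List Char × List Char
  | _, [] => ([], [])
  | 0, l => ([], l)  -- fuel exhausted: unreachable when fuel ≥ length of the list
  | f + 1, c :: rest =>
    if c = '\\' ∧ rest ≠ [] then
      (' ' :: ' ' :: (pvConsStr q f rest.tail).1, (pvConsStr q f rest.tail).2)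
    else if c = q then
      ([' '], rest)
    else
      (' ' :: (pvConsStr q f rest).1, (pvConsStr q f rest).2)

-- main loop of _consume_gstring_interpolation (entered with k = start+2, depth = 1)
def pvConsInterp (d : Nat) : Nat → List Char → List Char × List Char
  | _, [] => ([], [])
  | 0, l => ([], l)  -- fuel exhausted: unreachable when fuel ≥ length of the list
  | f + 1, c :: rest =>
    if c = '{' then
      ('{' :: (pvConsInterp (d + 1) f rest).1, (pvConsInterp (d + 1) f rest).2)
    else if c = '}' then
      if d = 1 then
        ([' '], rest)
      else
        ('}' :: (pvConsInterp (d - 1) f rest).1, (pvConsInterp (d - 1) f rest).2)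
    else if c = '"' ∨ c = '\'' then
      (' ' :: ((pvConsStr c f rest).1 ++ (pvConsInterp d f (pvConsStr c f rest).2).1),
        (pvConsInterp d f (pvConsStr c f rest).2).2)
    else if c = '\\' ∧ rest ≠ [] then
      (c :: rest.headD ' ' :: (pvConsInterp d f rest.tail).1, (pvConsInterp d f rest.tail).2)
    else
      (c :: (pvConsInterp d f rest).1, (pvConsInterp d f rest).2)

-- outer loop of _scrub_gstring_body
def pvScrubA : Nat → List Char → List Char
  | _, [] => []
  | 0, _ => []  -- fuel exhausted: unreachable when fuel ≥ length of the list
  | f + 1, c :: rest =>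
    if c = '\\' ∧ rest ≠ [] then
      ' ' :: ' ' :: pvScrubA f rest.tail
    else if c = '$' ∧ rest.head? = some '{' then
      (' ' :: ' ' :: (pvConsInterp 1 f rest.tail).1) ++ pvScrubA f (pvConsInterp 1 f rest.tail).2
    else
      ' ' :: pvScrubA f rest

def scrub_gstring_body_py (body : String) : String :=
  String.mk (pvScrubA body.toList.length body.toList)

-- ===== PORT B =====
-- the state variable of Source B: 0 = literal text, 1 = inside ${...} at depth d, 2 = nested string
inductive PvSt where
  | norm : PvSt
  | interp : Nat → PvSt
  | lit : Char → Nat → PvSt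

-- the single while-loop of Source B
def pvScrubB : Nat → PvSt → List Char → List Char
  | _, _, [] => []
  | 0, _, _ => []  -- fuel exhausted: unreachable when fuel ≥ length of the list
  | f + 1, .norm, c :: rest =>
    if c = '\\' ∧ rest ≠ [] then
      ' ' :: ' ' :: pvScrubB f .norm rest.tail
    else if c = '$' ∧ rest.head? = some '{' then
      ' ' :: ' ' :: pvScrubB f (.interp 1) rest.tail
    else
      ' ' :: pvScrubB f .norm rest
  | f + 1, .interp d, c :: rest =>
    if c = '{' then
      '{' :: pvScrubB f (.interp (d + 1)) rest
    else if c = '}' then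
      if d = 1 then ' ' :: pvScrubB f .norm rest
      else '}' :: pvScrubB f (.interp (d - 1)) rest
    else if c = '"' ∨ c = '\'' then
      ' ' :: pvScrubB f (.lit c d) rest
    else if c = '\\' ∧ rest ≠ [] then
      c :: rest.headD ' ' :: pvScrubB f (.interp d) rest.tail
    else
      c :: pvScrubB f (.interp d) rest
  | f + 1, .lit q d, c :: rest =>
    if c = '\\' ∧ rest ≠ [] then
      ' ' :: ' ' :: pvScrubB f (.lit q d) rest.tail
    else if c = q then
      ' ' :: pvScrubB f (.interp d) rest
    else
      ' ' :: pvScrubB f (.lit q d) rest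

def scrub_gstring_body_py_alt (body : String) : String :=
  String.mk (pvScrubB body.toList.length .norm body.toList)

-- ===== PRECONDITION & SPEC =====
def Spec_scrub_gstring_body_py (body : String) (out : String) : Prop := out = scrub_gstring_body_py_alt body
instance (body : String) (out : String) : Decidable (Spec_scrub_gstring_body_py body out) := by unfold Spec_scrub_gstring_body_py; infer_instance

-- ===== CLAIM (what is proved, stated in full; the proofs are below) =====
def Claim_equal_scrub_gstring_body_py : Prop := ∀ (body : String), Dom_scrub_gstring_body_py body → Spec_scrub_gstring_body_py body (scrub_gstring_body_py body)

-- ===== LEMMAS AND PROOFS =====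

theorem pvConsStr_len (q : Char) (f : Nat) (l : List Char) :
    (pvConsStr q f l).2.length ≤ l.length := by
  induction f generalizing l with
  | zero => cases l <;> simp [pvConsStr]
  | succ f ih =>
    cases l with
    | nil => simp [pvConsStr]
    | cons c rest =>
      have h1 := ih rest.tail
      have h2 := ih rest
      have h3 : rest.tail.length ≤ rest.length := by simp [List.length_tail]
      simp only [pvConsStr]
      split_ifs <;> simp only [List.length_cons] <;> omega

theorem pvConsInterp_len (d : Nat) (f : Nat) (l : List Char) :
    (pvConsInterp d f l).2.length ≤ l.length := by
  induction f generalizing d l with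
  | zero => cases l <;> simp [pvConsInterp]
  | succ f ih =>
    cases l with
    | nil => simp [pvConsInterp]
    | cons c rest =>
      have h1 := ih (d + 1) rest
      have h2 := ih (d - 1) rest
      have h3 := ih d (pvConsStr c f rest).2
      have h4 := pvConsStr_len c f rest
      have h5 := ih d rest.tail
      have h6 := ih d rest
      have h7 : rest.tail.length ≤ rest.length := by simp [List.length_tail]
      simp only [pvConsInterp]
      split_ifs <;> simp only [List.length_cons] <;> omega

theorem pvScrubB_fuel (f f' : Nat) (st : PvSt) (l : List Char)
    (h : l.length ≤ f) (h' : l.length ≤ f') : pvScrubB f st l = pvScrubB f' st l := by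
  induction f generalizing f' st l with
  | zero =>
    have : l = [] := by cases l <;> simp_all
    subst this
    cases f' <;> simp [pvScrubB]
  | succ f ih =>
    cases l with
    | nil => cases f' <;> simp [pvScrubB]
    | cons c rest =>
      cases f' with
      | zero => simp at h'
      | succ f'' =>
        have hr : rest.length ≤ f := by simp at h; omega
        have hr' : rest.length ≤ f'' := by simp at h'; omega
        have ht : rest.tail.length ≤ f := by simp [List.length_tail] at *; omega
        have ht' : rest.tail.length ≤ f'' := by simp [List.length_tail] at *; omega
        cases st <;> simp only [pvScrubB] <;> split_ifs <;>
          simp only [List.cons.injEq, true_and] <;>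
          exact ih _ _ _ (by assumption) (by assumption)

theorem pvLit_eq (q : Char) (d : Nat) (f : Nat) (l : List Char) (h : l.length ≤ f) :
    pvScrubB f (.lit q d) l = (pvConsStr q f l).1 ++ pvScrubB f (.interp d) (pvConsStr q f l).2 := by
  induction f generalizing l with
  | zero =>
    have : l = [] := by cases l <;> simp_all
    subst this; simp [pvConsStr, pvScrubB]
  | succ f ih =>
    cases l with
    | nil => simp [pvConsStr, pvScrubB]
    | cons c rest =>
      have hr : rest.length ≤ f := by simp at h; omega
      have ht : rest.tail.length ≤ f := by simp [List.length_tail] at *; omega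
      simp only [pvConsStr, pvScrubB]
      split_ifs with h1 h2
      · rw [ih rest.tail ht]
        simp only [List.cons_append, List.cons.injEq, true_and]
        exact congrArg _ (pvScrubB_fuel f (f + 1) _ _
          (le_trans (pvConsStr_len q f rest.tail) ht)
          (le_trans (pvConsStr_len q f rest.tail) (le_trans ht (Nat.le_succ f))))
      · simp only [List.cons_append, List.nil_append, List.cons.injEq, true_and]
        exact pvScrubB_fuel f (f + 1) _ _ hr (Nat.le_succ_of_le hr)
      · rw [ih rest hr]
        simp only [List.cons_append, List.cons.injEq, true_and]
        exact congrArg _ (pvScrubB_fuel f (f + 1) _ _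
          (le_trans (pvConsStr_len q f rest) hr)
          (le_trans (pvConsStr_len q f rest) (Nat.le_succ_of_le hr)))

theorem pvInterp_eq (d : Nat) (f : Nat) (l : List Char) (h : l.length ≤ f) :
    pvScrubB f (.interp d) l = (pvConsInterp d f l).1 ++ pvScrubB f .norm (pvConsInterp d f l).2 := by
  induction f generalizing d l with
  | zero =>
    have : l = [] := by cases l <;> simp_all
    subst this; simp [pvConsInterp, pvScrubB]
  | succ f ih =>
    cases l with
    | nil => simp [pvConsInterp, pvScrubB]
    | cons c rest =>
      have hr : rest.length ≤ f := by simp at h; omega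
      have ht : rest.tail.length ≤ f := by simp [List.length_tail] at *; omega
      simp only [pvConsInterp, pvScrubB]
      split_ifs with h1 h2 h3 h4 h5
      · -- '{'
        rw [ih (d + 1) rest hr]
        simp only [List.cons_append, List.cons.injEq, true_and]
        exact congrArg _ (pvScrubB_fuel f (f + 1) _ _
          (le_trans (pvConsInterp_len (d + 1) f rest) hr)
          (le_trans (pvConsInterp_len (d + 1) f rest) (Nat.le_succ_of_le hr)))
      · -- '}' closing
        simp only [List.cons_append, List.nil_append, List.cons.injEq, true_and]
        exact pvScrubB_fuel f (f + 1) _ _ hr (Nat.le_succ_of_le hr)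
      · -- '}' inner
        rw [ih (d - 1) rest hr]
        simp only [List.cons_append, List.cons.injEq, true_and]
        exact congrArg _ (pvScrubB_fuel f (f + 1) _ _
          (le_trans (pvConsInterp_len (d - 1) f rest) hr)
          (le_trans (pvConsInterp_len (d - 1) f rest) (Nat.le_succ_of_le hr)))
      · -- quote: nested string literal
        have hq : (pvConsStr c f rest).2.length ≤ f := le_trans (pvConsStr_len c f rest) hr
        rw [pvLit_eq c d f rest hr, ih d (pvConsStr c f rest).2 hq]
        simp only [List.cons_append, List.append_assoc, List.cons.injEq, true_and]
        exact congrArg _ (congrArg _ (pvScrubB_fuel f (f + 1) _ _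
          (le_trans (pvConsInterp_len d f (pvConsStr c f rest).2) hq)
          (le_trans (pvConsInterp_len d f (pvConsStr c f rest).2) (Nat.le_succ_of_le hq))))
      · -- backslash escape
        rw [ih d rest.tail ht]
        simp only [List.cons_append, List.cons.injEq, true_and]
        exact congrArg _ (pvScrubB_fuel f (f + 1) _ _
          (le_trans (pvConsInterp_len d f rest.tail) ht)
          (le_trans (pvConsInterp_len d f rest.tail) (le_trans ht (Nat.le_succ f))))
      · -- plain char
        rw [ih d rest hr]
        simp only [List.cons_append, List.cons.injEq, true_and]
        exact congrArg _ (pvScrubB_fuel f (f + 1) _ _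
          (le_trans (pvConsInterp_len d f rest) hr)
          (le_trans (pvConsInterp_len d f rest) (Nat.le_succ_of_le hr)))

theorem pvScrub_eq (f : Nat) (l : List Char) (h : l.length ≤ f) :
    pvScrubA f l = pvScrubB f .norm l := by
  induction f generalizing l with
  | zero =>
    have : l = [] := by cases l <;> simp_all
    subst this; simp [pvScrubA, pvScrubB]
  | succ f ih =>
    cases l with
    | nil => simp [pvScrubA, pvScrubB]
    | cons c rest =>
      have hr : rest.length ≤ f := by simp at h; omega
      have ht : rest.tail.length ≤ f := by simp [List.length_tail] at *; omega
      simp only [pvScrubA, pvScrubB]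
      split_ifs with h1 h2
      · rw [ih rest.tail ht]
      · have hq : (pvConsInterp 1 f rest.tail).2.length ≤ f :=
          le_trans (pvConsInterp_len 1 f rest.tail) ht
        rw [pvInterp_eq 1 f rest.tail ht, ih (pvConsInterp 1 f rest.tail).2 hq]
        simp
      · rw [ih rest hr]

-- ===== VERDICT (by name: the statement is the Claim_ definition above) =====
theorem scrub_gstring_body_py_spec : Claim_equal_scrub_gstring_body_py := by
  intro body _
  unfold Spec_scrub_gstring_body_py scrub_gstring_body_py scrub_gstring_body_py_alt
  rw [pvScrub_eq body.toList.length body.toList (le_refl _)]
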